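-- pv_equiv track=rewrite | github.com/vitmfs/Python_Theoretical_Chemistry | line_cleaner.py | getIndexesForStarAndEnd
-- ===== SOURCE A (Python) =====
-- def getIndexesForStarAndEnd( lines ):
--
--     line_before_beginning_part  = "MODEL"
--     line_after_end_part         = "TER"
--
--     all_start_and_end_indexes = []
--
--     start_and_end_index = []
--
--     lines_length = len( lines )
--
--     for i in range( 0, lines_length ):
--
--         # GET BEGINNING INDEX
--         if line_before_beginning_part in lines[i]:
--
--             start_and_end_index.append( i + 1 )
--
--         # GET ENDING INDEX
--         if line_after_end_part in lines[i]:
--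
--             start_and_end_index.append( i - 1 )
--
--             # AFTER GETTING THE ENDING INDEX, WE ADD IT TO ALL INDEXES
--             # AND CLEAN THE TEMP LIST
--             all_start_and_end_indexes.append( start_and_end_index )
--             start_and_end_index = []
--
--     return all_start_and_end_indexes
-- ===== SOURCE B (Python) =====
-- def getIndexesForStarAndEnd(lines):
--     # Pass 1: one ordered event list (is_start, index) per marker occurrence.
--     events = []
--     for i, line in enumerate(lines):
--         if "MODEL" in line:
--             events.append((True, i + 1))
--         if "TER" in line:
--             events.append((False, i - 1))
--     # Pass 2: group events; emit the current group on every end event.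
--     groups = []
--     current = []
--     for is_start, idx in events:
--         current = current + [idx]
--         if not is_start:
--             groups = groups + [current]
--             current = []
--     return groups
-- ===== Notes on version B (the rewrite author's own statement) =====
-- stated objective: alternative
-- what changed: Replaces A's single index loop that grows and flushes the group in place with a two-pass decomposition: one pass builds an ordered (start/end, index) event list, a second pass folds that event list into groups, emitting on each end event.
import Mathlib
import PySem

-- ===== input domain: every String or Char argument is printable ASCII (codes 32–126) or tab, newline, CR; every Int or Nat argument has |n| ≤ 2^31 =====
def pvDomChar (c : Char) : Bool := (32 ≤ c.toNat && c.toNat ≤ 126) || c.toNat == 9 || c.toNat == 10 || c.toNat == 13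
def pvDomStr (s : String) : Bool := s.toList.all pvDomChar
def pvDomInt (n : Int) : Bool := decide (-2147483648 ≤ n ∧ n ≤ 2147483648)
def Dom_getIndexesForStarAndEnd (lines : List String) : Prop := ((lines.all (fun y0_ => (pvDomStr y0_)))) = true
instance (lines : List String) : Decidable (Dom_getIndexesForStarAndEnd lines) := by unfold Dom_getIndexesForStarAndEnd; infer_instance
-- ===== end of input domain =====

-- B replaces A's single index loop (grow-and-flush in place) by a two-pass decomposition:
-- an ordered start/end event list built first, then a fold over events that groups them.


-- ===== PORT A =====
-- A's loop body over index i, with state (all_start_and_end_indexes, start_and_end_index).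
def pvStepA (st : List (List Int) × List Int) (e : Int × String) : List (List Int) × List Int :=
  let st1 := if PySem.Str.isIn "MODEL" e.2 then (st.1, st.2 ++ [e.1 + 1]) else st
  if PySem.Str.isIn "TER" e.2 then (st1.1 ++ [st1.2 ++ [e.1 - 1]], []) else st1

def getIndexesForStarAndEnd (lines : List String) : List (List Int) :=
  let linesLength : Int := (lines.length : Int)
  ((PySem.List.pyRange 0 linesLength 1).foldl
    (fun st i => pvStepA st (i, PySem.List.pyGetD lines i "")) ([], [])).1

-- ===== PORT B =====
-- Pass 1: the events contributed by one enumerated line (0, 1 or 2 of them, start first).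
def pvEv (e : Int × String) : List (Bool × Int) :=
  (if PySem.Str.isIn "MODEL" e.2 then [(true, e.1 + 1)] else []) ++
  (if PySem.Str.isIn "TER" e.2 then [(false, e.1 - 1)] else [])

-- Pass 2: group events, emitting the current group on each end event.
def pvStepB (st : List (List Int) × List Int) (ev : Bool × Int) : List (List Int) × List Int :=
  let current := st.2 ++ [ev.2]
  if ev.1 then (st.1, current) else (st.1 ++ [current], [])

def getIndexesForStarAndEnd_alt (lines : List String) : List (List Int) :=
  let events := (PySem.List.enumerate lines).foldl (fun acc e => acc ++ pvEv e) []
  (events.foldl pvStepB ([], [])).1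

-- ===== PRECONDITION & SPEC =====
def Spec_getIndexesForStarAndEnd (lines : List String) (out : List (List Int)) : Prop := out = getIndexesForStarAndEnd_alt lines
instance (lines : List String) (out : List (List Int)) : Decidable (Spec_getIndexesForStarAndEnd lines out) := by unfold Spec_getIndexesForStarAndEnd; infer_instance

-- ===== CLAIM (what is proved, stated in full; the proofs are below) =====
def Claim_equal_getIndexesForStarAndEnd : Prop := ∀ (lines : List String), Dom_getIndexesForStarAndEnd lines → Spec_getIndexesForStarAndEnd lines (getIndexesForStarAndEnd lines)

-- ===== LEMMAS AND PROOFS =====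

-- One A-step equals folding B's step over the events of that element.
theorem pvStep_agree (st : List (List Int) × List Int) (e : Int × String) :
    pvStepA st e = (pvEv e).foldl pvStepB st := by
  obtain ⟨all, cur⟩ := st
  simp only [pvStepA, pvEv]
  split_ifs <;> simp [pvStepB]

-- Folding A's step over an event source equals folding B's step over its flattened events.
theorem pv_fold_agree (es : List (Int × String)) (st : List (List Int) × List Int) :
    es.foldl pvStepA st = (es.flatMap pvEv).foldl pvStepB st := by
  induction es generalizing st with
  | nil => rfl
  | cons e es ih =>
      simp only [List.flatMap_cons, List.foldl_cons, List.foldl_append, pvStep_agree, ih]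

-- ===== VERDICT (by name: the statement is the Claim_ definition above) =====
theorem getIndexesForStarAndEnd_spec : Claim_equal_getIndexesForStarAndEnd := by
  intro lines _
  show getIndexesForStarAndEnd lines = getIndexesForStarAndEnd_alt lines
  simp only [getIndexesForStarAndEnd, getIndexesForStarAndEnd_alt,
    PySem.List.foldl_append_eq_flatMap, List.nil_append]
  rw [PySem.List.enumerate_eq_map_pyRange lines "", ← pv_fold_agree, List.foldl_map]
  rfl
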